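-- pv_equiv track=rewrite | github.com/pypi-data/pypi-mirror-232 | packages/evm-architect/evm_architect-1.0.0.tar.gz/evm_architect-1.0.0/src/evm_architect/architect.py | getHighest
-- ===== SOURCE A (Python) =====
-- def getHighest(creationdict):
--     #returns the highest member in the architecture
--     masterlist=[]
--     for lists in creationdict.values():
--         masterlist.extend(lists)
--
--     keylist=list(creationdict.keys())
--
--     for val in masterlist:
--         if val in keylist:
--             keylist.remove(val)
--     return keylist[0]
-- ===== SOURCE B (Python) =====
-- def getHighest(creationdict):
--     # returns the highest member in the architecture
--     remaining = [key for key in creationdict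
--                  if not any(key in lst for lst in creationdict.values())]
--     return remaining[0]
-- ===== Notes on version B (the rewrite author's own statement) =====
-- stated objective: idiomatic
-- what changed: Replaces A's flatten-all-values-then-destructively-remove strategy by a single comprehension that keeps each key appearing in no value list and returns its first element.
-- outside the precondition, e.g. on getHighest({}): A raises IndexError, B raises IndexError
import Mathlib
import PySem

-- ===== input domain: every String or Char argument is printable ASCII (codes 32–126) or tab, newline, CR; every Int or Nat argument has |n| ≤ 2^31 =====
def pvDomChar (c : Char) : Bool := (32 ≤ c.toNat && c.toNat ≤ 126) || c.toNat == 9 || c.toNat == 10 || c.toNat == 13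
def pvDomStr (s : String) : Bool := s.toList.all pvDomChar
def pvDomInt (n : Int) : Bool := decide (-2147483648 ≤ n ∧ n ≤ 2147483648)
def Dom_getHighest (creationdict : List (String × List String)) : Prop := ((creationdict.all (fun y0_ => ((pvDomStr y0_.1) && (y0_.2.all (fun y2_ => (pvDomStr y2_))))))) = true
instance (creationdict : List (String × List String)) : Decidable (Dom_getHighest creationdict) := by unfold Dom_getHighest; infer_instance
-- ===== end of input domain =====

-- B drops A's flatten-then-destructively-remove pass in favour of a single comprehension
-- testing each key directly against the value lists (idiomatic, same cost).

-- ===== PORT A =====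
def getHighest (creationdict : List (String × List String)) : String :=
  -- masterlist = []; for lists in creationdict.values(): masterlist.extend(lists)
  let masterlist : List String := creationdict.foldl (fun acc p => acc ++ p.2) []
  -- keylist = list(creationdict.keys())
  let keylist0 : List String := creationdict.map Prod.fst
  -- for val in masterlist: if val in keylist: keylist.remove(val)
  let keylist : List String := masterlist.foldl
    (fun kl val => if kl.contains val then (PySem.List.remove? kl val).getD kl else kl) keylist0
  -- return keylist[0]  (IndexError when empty: excluded by Pre_)
  (PySem.List.pyGet? keylist 0).getD ""

-- ===== PORT B =====
def getHighest_alt (creationdict : List (String × List String)) : String :=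
  -- remaining = [key for key in creationdict if not any(key in lst for lst in creationdict.values())]
  let remaining : List String := (creationdict.map Prod.fst).filter
    (fun key => !((creationdict.map Prod.snd).any (fun lst => lst.contains key)))
  -- return remaining[0]  (IndexError when empty: excluded by Pre_)
  (PySem.List.pyGet? remaining 0).getD ""

-- ===== PRECONDITION & SPEC =====
-- Keys must be pairwise distinct (an association list with duplicate keys does not
-- represent any Python dict), and some key must not occur in any value list — on a
-- fully covered (or empty) dict A raises IndexError at keylist[0] (and B at remaining[0]).
def Pre_getHighest (creationdict : List (String × List String)) : Prop :=
  (creationdict.map Prod.fst).Nodup ∧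
  ∃ p ∈ creationdict, ∀ q ∈ creationdict, p.1 ∉ q.2
instance (creationdict : List (String × List String)) : Decidable (Pre_getHighest creationdict) := by
  unfold Pre_getHighest; infer_instance

def pvWitness_getHighest : (List (String × List String)) := [("a", ["b"]), ("b", [])]

def Spec_getHighest (creationdict : List (String × List String)) (out : String) : Prop := out = getHighest_alt creationdict
instance (creationdict : List (String × List String)) (out : String) : Decidable (Spec_getHighest creationdict out) := by unfold Spec_getHighest; infer_instance

-- ===== CLAIM (what is proved, stated in full; the proofs are below) =====
def Claim_equal_getHighest : Prop := ∀ (creationdict : List (String × List String)), Dom_getHighest creationdict → Pre_getHighest creationdict → Spec_getHighest creationdict (getHighest creationdict)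

-- ===== LEMMAS AND PROOFS =====

-- One step of A's removal loop on a duplicate-free keylist is just a filter.
theorem removeStep_eq_filter (kl : List String) (v : String) (h : kl.Nodup) :
    (if kl.contains v then (PySem.List.remove? kl v).getD kl else kl)
      = kl.filter (fun k => !(k == v)) := by
  by_cases hv : v ∈ kl
  · rw [if_pos (by simpa using hv), PySem.List.remove?_eq_some_erase kl v hv]
    simp [h.erase_eq_filter, bne]
  · rw [if_neg (by simpa using hv)]
    exact (List.filter_eq_self.2 (fun a ha => by simp; rintro rfl; exact hv ha)).symm

-- A's whole removal loop on a duplicate-free keylist filters out the masterlist members.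
theorem removeFold_eq_filter (ml kl : List String) (h : kl.Nodup) :
    ml.foldl (fun kl val => if kl.contains val then (PySem.List.remove? kl val).getD kl else kl) kl
      = kl.filter (fun k => !(ml.contains k)) := by
  induction ml generalizing kl with
  | nil => simp
  | cons v ms ih =>
      rw [List.foldl_cons, removeStep_eq_filter kl v h, ih _ (h.filter _),
          List.filter_filter]
      refine List.filter_congr (fun a _ => ?_)
      rw [Bool.eq_iff_iff]
      simp
      tauto

theorem flatten_values (creationdict : List (String × List String)) :
    creationdict.foldl (fun acc p => acc ++ p.2) [] = (creationdict.map Prod.snd).flatten := by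
  have := PySem.List.foldl_append_eq_flatten (xs := creationdict.map Prod.snd) (acc := ([] : List String))
  simpa [List.foldl_map] using this

-- ===== VERDICT (by name: the statement is the Claim_ definition above) =====
theorem getHighest_spec : Claim_equal_getHighest := by
  intro cd _ hpre
  unfold Spec_getHighest getHighest getHighest_alt
  simp only [flatten_values, removeFold_eq_filter _ _ hpre.1]
  congr 2
  refine List.filter_congr (fun a _ => ?_)
  rw [Bool.not_inj_iff, Bool.eq_iff_iff]
  simp [List.mem_flatten, List.any_eq_true]
  tauto
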